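-- pv_equiv track=rewrite | github.com/Harikrishnan200/LEETCODE-PROBLEMS | Cognizant-1.py | solution
-- ===== SOURCE A (Python) =====
-- def solution(arr):
--     prev = ""
--     result = ""
--     for i in arr:
--         if i != prev:
--             result += str(ord(i) - ord('A') + 1)
--             prev = i
--         else:
--             result += '*'
--     return result
-- ===== SOURCE B (Python) =====
-- def solution(arr):
--     parts = []
--     i, n = 0, len(arr)
--     while i < n:
--         j = i + 1
--         while j < n and arr[j] == arr[i]:
--             j += 1
--         parts.append(str(ord(arr[i]) - ord('A') + 1) + '*' * (j - i - 1))
--         i = j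
--     return "".join(parts)
-- ===== Notes on version B (the rewrite author's own statement) =====
-- stated objective: alternative
-- what changed: B scans the input run by run (outer loop over maximal runs of equal elements, inner loop measuring the run length), emitting the letter code once and '*'*(len-1) per run, instead of A's flat scan with a prev-tracking accumulator.
-- outside the precondition, e.g. on solution(['']): A returns '*', B raises TypeError
import Mathlib
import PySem

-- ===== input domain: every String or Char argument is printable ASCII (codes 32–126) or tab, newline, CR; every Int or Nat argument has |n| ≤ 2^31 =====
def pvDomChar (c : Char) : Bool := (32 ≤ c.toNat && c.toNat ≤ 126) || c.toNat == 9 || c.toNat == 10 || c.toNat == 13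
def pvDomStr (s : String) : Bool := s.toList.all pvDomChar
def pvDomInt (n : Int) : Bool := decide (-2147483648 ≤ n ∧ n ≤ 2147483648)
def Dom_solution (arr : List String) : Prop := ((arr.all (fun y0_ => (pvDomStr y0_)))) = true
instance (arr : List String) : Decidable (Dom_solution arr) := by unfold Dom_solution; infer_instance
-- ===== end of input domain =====

-- B re-traverses the input run by run (outer loop over maximal runs, inner run-length count)
-- instead of A's flat prev-tracking scan; same cost, different decomposition (objective: alternative).

-- ord(s) for a ONE-character string (exact there; Pre_ restricts to such inputs — Python ord raises otherwise)
def pvOrd (s : String) : Int :=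
  match s.toList with
  | [c] => (c.toNat : Int)
  | _ => 0

-- str(ord(i) - ord('A') + 1)
def pvEnc (s : String) : String := PySem.Int.toStr (pvOrd s - 65 + 1)

-- ===== PORT A =====
-- the body of A's for-loop over (prev, result)
def pvStepA (st : String × String) (i : String) : String × String :=
  if i ≠ st.1 then (i, st.2 ++ pvEnc i) else (st.1, st.2 ++ "*")

def solution (arr : List String) : String :=
  (arr.foldl pvStepA ("", "")).2

-- ===== PORT B =====
-- inner while: number of further elements equal to the run head
def pvRunLen (k : String) : List String → Nat
  | [] => 0
  | x :: xs => if x = k then pvRunLen k xs + 1 else 0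

-- outer while: one parts-entry per maximal run: letter code ++ '*' * (run length - 1)
def pvGoB : List String → List String
  | [] => []
  | k :: rest =>
    let m := pvRunLen k rest
    (pvEnc k ++ String.mk (List.replicate m '*')) :: pvGoB (rest.drop m)
termination_by l => l.length
decreasing_by simp

def solution_alt (arr : List String) : String := String.join (pvGoB arr)

-- ===== PRECONDITION & SPEC =====
-- Pre_ excludes inputs with an element that is not a single character: on those Python's ord
-- raises a TypeError at the run head — except when a leading run of empty strings coincides with
-- A's "" sentinel for prev, where A's '*' output is an accident of the sentinel (B raises there).
def Pre_solution (arr : List String) : Prop := ∀ s ∈ arr, s.toList.length = 1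
instance (arr : List String) : Decidable (Pre_solution arr) := by unfold Pre_solution; infer_instance

def pvWitness_solution : List String := ["A", "A", "B", "C", "C"]

def Spec_solution (arr : List String) (out : String) : Prop := out = solution_alt arr
instance (arr : List String) (out : String) : Decidable (Spec_solution arr out) := by unfold Spec_solution; infer_instance

-- ===== CLAIM (what is proved, stated in full; the proofs are below) =====
def Claim_equal_solution : Prop := ∀ (arr : List String), Dom_solution arr → Pre_solution arr → Spec_solution arr (solution arr)

-- ===== LEMMAS AND PROOFS =====

theorem pvToList_mk (l : List Char) : (String.mk l).toList = l :=
  Eq.symm (String.ofList_eq.mp rfl)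

-- ''.join with a nonempty accumulator
theorem pvJoin_acc (L : List String) (a : String) : L.foldl (fun r s => r ++ s) a = a ++ String.join L := by
  induction L generalizing a with
  | nil => simp [String.join]
  | cons x xs ih =>
    simp only [List.foldl_cons, String.join, ih (a ++ x)]
    rw [show ("" : String) ++ x = x from by simp, ih x, String.append_assoc]
    simp [String.join]

-- the accumulated result string factors out of A's fold
theorem pvFoldA_acc (l : List String) (p r : String) :
    l.foldl pvStepA (p, r) = ((l.foldl pvStepA (p, "")).1, r ++ (l.foldl pvStepA (p, "")).2) := by
  induction l generalizing p r with
  | nil => simp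
  | cons i l ih =>
    simp only [List.foldl_cons, pvStepA]
    by_cases h : i = p
    · simp [h]
      rw [ih p "*", ih p (r ++ "*")]
      simp [String.append_assoc]
    · simp [h]
      rw [ih i (pvEnc i), ih i (r ++ pvEnc i)]
      simp [String.append_assoc]

-- a run of m copies of the current prev contributes m stars
theorem pvFoldA_run (m : Nat) (rest : List String) (k r : String) :
    (List.replicate m k ++ rest).foldl pvStepA (k, r) =
      rest.foldl pvStepA (k, r ++ String.mk (List.replicate m '*')) := by
  induction m generalizing r with
  | zero => simp [show String.mk ([] : List Char) = "" from rfl]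
  | succ m ih =>
    simp only [List.replicate_succ, List.cons_append, List.foldl_cons, pvStepA,
      ne_eq, not_true_eq_false, if_false]
    rw [ih (r ++ "*")]
    rw [String.append_assoc,
      show ("*" : String) ++ String.mk (List.replicate m '*') = String.mk ('*' :: List.replicate m '*') from
        String.toList_injective (by simp [pvToList_mk])]

theorem pvRunLen_take (k : String) (rest : List String) :
    rest.take (pvRunLen k rest) = List.replicate (pvRunLen k rest) k := by
  induction rest with
  | nil => simp [pvRunLen]
  | cons x xs ih =>
    by_cases h : x = k
    · simp [pvRunLen, h, ih, List.replicate_succ]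
    · simp [pvRunLen, h]

theorem pvRunLen_drop (k : String) (rest : List String) :
    (rest.drop (pvRunLen k rest)).head? ≠ some k := by
  induction rest with
  | nil => simp [pvRunLen]
  | cons x xs ih =>
    by_cases h : x = k
    · simpa [pvRunLen, h] using ih
    · simp [pvRunLen, h]

-- main invariant: when prev differs from the head, A's fold produces B's run decomposition
theorem pvMain (n : Nat) (l : List String) (p : String) (hn : l.length ≤ n)
    (hp : l.head? ≠ some p) :
    (l.foldl pvStepA (p, "")).2 = String.join (pvGoB l) := by
  induction n generalizing l p with
  | zero =>
    have : l = [] := List.eq_nil_of_length_eq_zero (Nat.le_zero.mp hn)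
    subst this; rw [pvGoB.eq_def]; simp [String.join]
  | succ n ih =>
    cases l with
    | nil => rw [pvGoB.eq_def]; simp [String.join]
    | cons k rest =>
      have hkp : k ≠ p := by simpa using hp
      set m := pvRunLen k rest with hm
      have hsplit : rest = List.replicate m k ++ rest.drop m := by
        conv_lhs => rw [← List.take_append_drop m rest]
        rw [pvRunLen_take]
      simp only [List.foldl_cons, pvStepA, ne_eq, hkp, not_false_eq_true, if_pos]
      rw [show ((k, ("" : String) ++ pvEnc k) : String × String) = (k, pvEnc k) by simp]
      conv_lhs => rw [hsplit]
      rw [pvFoldA_run m (rest.drop m) k (pvEnc k)]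
      rw [pvFoldA_acc (rest.drop m) k (pvEnc k ++ String.mk (List.replicate m '*'))]
      have hlen : (rest.drop m).length ≤ n := by
        have := List.length_drop (l := rest) (i := m)
        have h1 : rest.length ≤ n := by simpa using Nat.lt_succ_iff.mp (Nat.lt_of_lt_of_le (by simp) hn)
        simp only [this]
        omega
      rw [ih (rest.drop m) k hlen (pvRunLen_drop k rest)]
      show pvEnc k ++ String.mk (List.replicate m '*') ++ String.join (pvGoB (rest.drop m)) =
        String.join (pvGoB (k :: rest))
      conv_rhs => rw [pvGoB.eq_def]
      simp only [String.join, List.foldl_cons, ← hm]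
      rw [show ("" : String) ++ (pvEnc k ++ String.mk (List.replicate m '*')) = pvEnc k ++ String.mk (List.replicate m '*') from by simp]
      rw [pvJoin_acc (pvGoB (List.drop m rest)) (pvEnc k ++ String.mk (List.replicate m '*'))]
      simp [String.join]

-- ===== VERDICT (by name: the statement is the Claim_ definition above) =====
theorem solution_spec : Claim_equal_solution := by
  intro arr _ hpre
  unfold Spec_solution solution solution_alt
  apply pvMain arr.length arr "" le_rfl
  cases arr with
  | nil => simp
  | cons s l =>
    have := hpre s (by simp)
    simp only [List.head?_cons, ne_eq, Option.some.injEq]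
    intro he
    rw [he] at this
    simp at this
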